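-- pv_equiv track=rewrite | github.com/Jlerda/Codecademy | Hurricane.py | hurricane_for_area
-- ===== SOURCE A (Python) =====
-- def unique_value(list_with_rep): # helper to create a list without repetitions
--   uni_value = []
--   for value in list_with_rep:
--     if value not in uni_value:
--       uni_value.append(value)
--   return uni_value
--
-- def hurricane_for_area(areas_affected):
--   unify_list = []
--   for element in areas_affected:
--     unify_list += element
--
--   single_list = unique_value(unify_list)
--   hurricane_area = {}
--   for value in single_list:
--     hurricane_area[value] = unify_list.count(value)
--   return hurricane_area
-- ===== SOURCE B (Python) =====
-- def hurricane_for_area(areas_affected):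
--   counts = {}
--   for element in areas_affected:
--     for value in element:
--       counts[value] = counts.get(value, 0) + 1
--   return counts
-- ===== Notes on version B (the rewrite author's own statement) =====
-- stated objective: faster
-- what changed: Replaces A's flatten + hand-rolled dedup pass + per-key list.count scan with a single nested-loop pass that increments a counting dict entry per element.
import Mathlib
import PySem

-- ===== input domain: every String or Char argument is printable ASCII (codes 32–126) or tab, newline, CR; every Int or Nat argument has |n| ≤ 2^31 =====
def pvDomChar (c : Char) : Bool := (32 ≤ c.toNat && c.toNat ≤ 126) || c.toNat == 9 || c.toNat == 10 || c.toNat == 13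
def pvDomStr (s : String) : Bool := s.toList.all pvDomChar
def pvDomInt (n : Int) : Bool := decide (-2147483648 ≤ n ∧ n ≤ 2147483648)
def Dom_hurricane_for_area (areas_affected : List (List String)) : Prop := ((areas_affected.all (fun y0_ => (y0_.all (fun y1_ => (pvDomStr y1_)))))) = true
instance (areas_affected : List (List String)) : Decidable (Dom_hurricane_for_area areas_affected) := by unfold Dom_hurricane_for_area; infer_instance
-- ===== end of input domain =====

-- B replaces A's flatten + dedup + per-key count scans with one counting-dict pass (measured faster; same return value).


-- ===== PORT A =====
-- helper: A's unique_value (hand-rolled first-occurrence dedup)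
def pvUniqueValue (list_with_rep : List String) : List String :=
  list_with_rep.foldl (fun uni_value value =>
    if value ∈ uni_value then uni_value else uni_value ++ [value]) []

def hurricane_for_area (areas_affected : List (List String)) : List (String × Int) :=
  let unify_list := areas_affected.foldl (fun acc element => acc ++ element) []
  let single_list := pvUniqueValue unify_list
  (single_list.foldl
    (fun hurricane_area value => hurricane_area.insert value (unify_list.count value : Int))
    PySem.Dict.empty).items

-- ===== PORT B =====
def hurricane_for_area_alt (areas_affected : List (List String)) : List (String × Int) :=
  (areas_affected.foldl
    (fun counts element =>
      element.foldl (fun counts value => counts.insert value (counts.getD value 0 + 1)) counts)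
    PySem.Dict.empty).items

-- ===== PRECONDITION & SPEC =====
def Spec_hurricane_for_area (areas_affected : List (List String)) (out : List (String × Int)) : Prop := out = hurricane_for_area_alt areas_affected
instance (areas_affected : List (List String)) (out : List (String × Int)) : Decidable (Spec_hurricane_for_area areas_affected out) := by unfold Spec_hurricane_for_area; infer_instance

-- ===== CLAIM (what is proved, stated in full; the proofs are below) =====
def Claim_equal_hurricane_for_area : Prop := ∀ (areas_affected : List (List String)), Dom_hurricane_for_area areas_affected → Spec_hurricane_for_area areas_affected (hurricane_for_area areas_affected)

-- ===== LEMMAS AND PROOFS =====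

-- A's hand-rolled unique_value computes the first-occurrence dedup (PySem.Set.ofList)
theorem pvUniqueValue_eq_ofList (l : List String) : pvUniqueValue l = PySem.Set.ofList l := by
  unfold pvUniqueValue PySem.Set.ofList
  congr 1
  funext acc v
  simp [PySem.Set.add]

-- inserting pairwise-distinct fresh keys appends their (key, f key) pairs to the items list
theorem foldl_insert_fresh_items (f : String → Int) :
    ∀ (ys : List String) (d : PySem.Dict String Int), ys.Nodup →
      (∀ v ∈ ys, d.contains v = false) →
      (ys.foldl (fun d v => d.insert v (f v)) d).items
        = d.items ++ ys.map (fun v => (v, f v)) := by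
  intro ys
  induction ys with
  | nil => intro d _ _; simp
  | cons y t ih =>
      intro d hnd hfresh
      simp only [List.foldl_cons, List.map_cons]
      rw [ih (d.insert y (f y)) (List.Nodup.of_cons hnd)]
      · rw [PySem.Dict.items_insert_of_not_contains _ _ (hfresh y (by simp))]
        simp
      · intro v hv
        rw [PySem.Dict.contains_insert]
        have hne : v ≠ y := by
          rcases List.nodup_cons.mp hnd with ⟨hy, _⟩
          exact fun h => hy (h ▸ hv)
        simp [hne, hfresh v (List.mem_cons_of_mem _ hv)]

-- B's nested loop is the counting loop over the flattened list
theorem alt_eq_counter_items (areas_affected : List (List String)) :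
    hurricane_for_area_alt areas_affected
      = (PySem.Dict.counter (areas_affected.foldl (fun acc element => acc ++ element) [])).items := by
  unfold hurricane_for_area_alt
  rw [← PySem.Dict.foldl_insert_getD_add_one_eq_counter]
  congr 1
  induction areas_affected using List.reverseRecOn with
  | nil => rfl
  | append_singleton t e ih => simp [List.foldl_append, ih]

-- ===== VERDICT (by name: the statement is the Claim_ definition above) =====
theorem hurricane_for_area_spec : Claim_equal_hurricane_for_area := by
  intro areas_affected _
  unfold Spec_hurricane_for_area
  rw [alt_eq_counter_items, PySem.Dict.items_counter]
  simp only [hurricane_for_area]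
  rw [pvUniqueValue_eq_ofList,
      foldl_insert_fresh_items _ (PySem.Set.ofList (areas_affected.foldl (fun acc element => acc ++ element) []))
        PySem.Dict.empty (PySem.Set.nodup_ofList _) (by intro v _; simp)]
  simp [PySem.Dict.empty]
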